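-- pv_equiv track=rewrite | github.com/onlyhooops/plookingII | plookingII/core/optimized_algorithms.py | optimized_window_sliding
-- ===== SOURCE A (Python) =====
-- from collections import defaultdict, deque
-- from collections.abc import Iterator
-- from typing import Any
--
-- def optimized_window_sliding(items: list[Any], window_size: int) -> Iterator[list[Any]]:
--     """优化的滑动窗口算法
--
--     Args:
--         items: 项列表
--         window_size: 窗口大小
--
--     Returns:
--         Iterator[List[Any]]: 滑动窗口迭代器
--     """
--     if not items or window_size <= 0:
--         return iter([])
--
--     # 使用deque实现高效的滑动窗口
--     window = deque(maxlen=window_size)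
--
--     for item in items:
--         window.append(item)
--         if len(window) == window_size:
--             yield list(window)
-- ===== SOURCE B (Python) =====
-- def optimized_window_sliding(items, window_size):
--     """Index-based sliding windows: yield a fresh slice per start index."""
--     if not items or window_size <= 0:
--         return
--     n = len(items)
--     for i in range(n - window_size + 1):
--         yield items[i:i + window_size]
-- ===== Notes on version B (the rewrite author's own statement) =====
-- stated objective: idiomatic
-- what changed: Replaces the bounded deque buffer (append-and-snapshot per element) with a plain start-index loop that yields one fresh slice items[i:i+window_size] per window position.
import Mathlib
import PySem

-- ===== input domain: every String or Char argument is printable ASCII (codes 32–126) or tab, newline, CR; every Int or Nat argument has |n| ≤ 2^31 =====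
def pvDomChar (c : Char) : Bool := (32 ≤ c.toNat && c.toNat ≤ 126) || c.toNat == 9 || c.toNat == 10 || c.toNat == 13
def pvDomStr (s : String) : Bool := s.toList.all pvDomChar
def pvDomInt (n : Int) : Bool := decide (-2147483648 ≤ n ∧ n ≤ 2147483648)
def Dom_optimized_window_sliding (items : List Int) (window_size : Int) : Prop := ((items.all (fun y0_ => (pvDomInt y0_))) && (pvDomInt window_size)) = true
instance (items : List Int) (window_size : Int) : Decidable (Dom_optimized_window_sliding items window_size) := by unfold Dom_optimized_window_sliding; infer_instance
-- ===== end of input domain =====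

-- B replaces A's bounded-deque buffer with a start-index loop yielding one slice per window
-- position (idiomatic; same cost). Both generators are materialised as the list of yielded windows.

-- ===== PORT A =====
-- deque(maxlen=k).append: when full, the oldest element is dropped. State = (window, yielded).
def optimized_window_sliding (items : List Int) (window_size : Int) : List (List Int) :=
  if items = [] ∨ window_size ≤ 0 then []
  else
    let k := window_size.toNat
    (items.foldl (fun (s : List Int × List (List Int)) item =>
      let w := if s.1.length = k then s.1.drop 1 ++ [item] else s.1 ++ [item]
      (w, if w.length = k then s.2 ++ [w] else s.2)) ([], [])).2

-- ===== PORT B =====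
def optimized_window_sliding_alt (items : List Int) (window_size : Int) : List (List Int) :=
  if items = [] ∨ window_size ≤ 0 then []
  else
    (PySem.List.pyRange 0 ((items.length : Int) - window_size + 1) 1).map
      (fun i => PySem.List.slice items (some i) (some (i + window_size)))

-- ===== PRECONDITION & SPEC =====
def Spec_optimized_window_sliding (items : List Int) (window_size : Int) (out : List (List Int)) : Prop := out = optimized_window_sliding_alt items window_size
instance (items : List Int) (window_size : Int) (out : List (List Int)) : Decidable (Spec_optimized_window_sliding items window_size out) := by unfold Spec_optimized_window_sliding; infer_instance

-- ===== CLAIM (what is proved, stated in full; the proofs are below) =====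
def Claim_equal_optimized_window_sliding : Prop := ∀ (items : List Int) (window_size : Int), Dom_optimized_window_sliding items window_size → Spec_optimized_window_sliding items window_size (optimized_window_sliding items window_size)

-- ===== LEMMAS AND PROOFS =====

-- the windows emitted by A's fold, with the output accumulator factored out
def pvWins (k : Nat) (w : List Int) : List Int → List (List Int)
  | [] => []
  | x :: rest =>
    let w' := if w.length = k then w.drop 1 ++ [x] else w ++ [x]
    (if w'.length = k then [w'] else []) ++ pvWins k w' rest

lemma pvFold_eq_wins (k : Nat) :
    ∀ (rest : List Int) (w : List Int) (out : List (List Int)),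
      (rest.foldl (fun (s : List Int × List (List Int)) item =>
        let w := if s.1.length = k then s.1.drop 1 ++ [item] else s.1 ++ [item]
        (w, if w.length = k then s.2 ++ [w] else s.2)) (w, out)).2
      = out ++ pvWins k w rest := by
  intro rest
  induction rest with
  | nil => intro w out; simp [pvWins]
  | cons x rest ih =>
    intro w out
    simp only [List.foldl_cons, pvWins, ih]
    split_ifs <;> simp

-- last k elements of l
def pvLastk (k : Nat) (l : List Int) : List Int := l.drop (l.length - k)

lemma pvLastk_length (k : Nat) (l : List Int) :
    (pvLastk k l).length = min k l.length := by
  unfold pvLastk; simp; omega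

lemma pvLastk_append (k : Nat) (hk : 0 < k) (w : List Int) (x : Int) (hw : w.length ≤ k) :
    (if w.length = k then w.drop 1 ++ [x] else w ++ [x]) = pvLastk k (w ++ [x]) := by
  unfold pvLastk
  split_ifs with h
  · have h1 : (w ++ [x]).length - k = 1 := by simp [h]
    rw [h1, List.drop_append_of_le_length (by omega)]
  · have h1 : (w ++ [x]).length - k = 0 := by simp; omega
    rw [h1, List.drop_zero]

lemma pvLastk_lastk_append (k : Nat) (l t : List Int) :
    pvLastk k (pvLastk k l ++ t) = pvLastk k (l ++ t) := by
  unfold pvLastk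
  rw [← List.drop_append_of_le_length (by omega : l.length - k ≤ l.length),
      List.drop_drop]
  congr 1
  simp
  omega

lemma pvWins_eq_filterMap (k : Nat) (hk : 0 < k) :
    ∀ (rest w : List Int), w.length ≤ k →
      pvWins k w rest = (List.range rest.length).filterMap
        (fun j => if k ≤ w.length + j + 1 then some (pvLastk k (w ++ rest.take (j+1))) else none) := by
  intro rest
  induction rest with
  | nil => intro w _; simp [pvWins]
  | cons x rest ih =>
    intro w hw
    simp only [pvWins]
    rw [pvLastk_append k hk w x hw]
    have hWle : (pvLastk k (w ++ [x])).length ≤ k := by rw [pvLastk_length]; omega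
    have hWlen : (pvLastk k (w ++ [x])).length = min (w.length + 1) k := by
      rw [pvLastk_length]; simp; omega
    rw [ih _ hWle]
    rw [List.length_cons, List.range_succ_eq_map, List.filterMap_cons, List.filterMap_map]
    by_cases hc : k ≤ w.length + 0 + 1
    · rw [if_pos hc,
        if_pos (show (pvLastk k (w ++ [x])).length = k by rw [hWlen]; omega)]
      simp only [List.singleton_append, List.take_succ_cons, List.take_zero]
      congr 1
      apply List.filterMap_congr
      intro j _
      simp only [Function.comp_apply, hWlen]
      by_cases h2 : k ≤ w.length + j.succ + 1
      · rw [if_pos (by omega), if_pos h2]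
        congr 1
        rw [show w ++ x :: List.take j.succ rest = (w ++ [x]) ++ List.take (j+1) rest by simp]
        exact pvLastk_lastk_append k (w ++ [x]) (List.take (j+1) rest)
      · rw [if_neg (by omega), if_neg h2]
    · rw [if_neg hc,
        if_neg (show ¬ (pvLastk k (w ++ [x])).length = k by rw [hWlen]; omega)]
      simp only [List.nil_append]
      apply List.filterMap_congr
      intro j _
      simp only [Function.comp_apply, List.take_succ_cons, hWlen]
      by_cases h2 : k ≤ w.length + j.succ + 1
      · rw [if_pos (by omega), if_pos h2]
        congr 1
        rw [show w ++ x :: List.take j.succ rest = (w ++ [x]) ++ List.take (j+1) rest by simp]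
        exact pvLastk_lastk_append k (w ++ [x]) (List.take (j+1) rest)
      · rw [if_neg (by omega), if_neg h2]

-- collapse the filterMap over range n to a map over range (n+1-k)
lemma pvFilterMap_range (k : Nat) (hk : 0 < k) (f : Nat → List Int) :
    ∀ (n : Nat),
      (List.range n).filterMap (fun j => if k ≤ j + 1 then some (f (j + 1 - k)) else none)
        = (List.range (n + 1 - k)).map f := by
  intro n
  induction n with
  | zero => simp [List.range_zero]; omega
  | succ n ih =>
    rw [List.range_succ, List.filterMap_append, ih, List.filterMap_cons]
    by_cases h : k ≤ n + 1
    · have : n + 1 + 1 - k = (n + 1 - k) + 1 := by omega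
      rw [if_pos h, this, List.range_succ, List.map_append]
      simp
    · rw [if_neg h]
      have : n + 1 + 1 - k = n + 1 - k := by omega
      rw [this]
      simp

lemma pvLastk_take (k : Nat) (l : List Int) (j : Nat) (hj : k ≤ j + 1) (hj2 : j < l.length) :
    pvLastk k (l.take (j + 1)) = (l.drop (j + 1 - k)).take k := by
  unfold pvLastk
  have hlen : (l.take (j+1)).length = j + 1 := by simp; omega
  rw [hlen, List.drop_take]
  congr 1
  omega

-- ===== VERDICT (by name: the statement is the Claim_ definition above) =====
theorem optimized_window_sliding_spec : Claim_equal_optimized_window_sliding := by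
  unfold Claim_equal_optimized_window_sliding Spec_optimized_window_sliding
  intro items ws _
  unfold optimized_window_sliding optimized_window_sliding_alt
  by_cases hg : items = [] ∨ ws ≤ 0
  · simp [hg]
  · rw [if_neg hg, if_neg hg]
    push Not at hg
    obtain ⟨hne, hpos⟩ := hg
    have hpos' : 0 < ws := by omega
    set k := ws.toNat with hkdef
    have hk : 0 < k := by omega
    have hws : (k : Int) = ws := by omega
    rw [pvFold_eq_wins, List.nil_append,
      pvWins_eq_filterMap k hk items [] (by simp)]
    have hstep : ∀ j ∈ List.range items.length,
        (if k ≤ List.length ([] : List Int) + j + 1 then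
          some (pvLastk k (([] : List Int) ++ items.take (j+1))) else none)
          = (if k ≤ j + 1 then
            some ((fun i => (items.drop i).take k) (j + 1 - k)) else none) := by
      intro j hj
      rw [List.mem_range] at hj
      simp only [List.length_nil, Nat.zero_add, List.nil_append]
      split_ifs with h
      · rw [pvLastk_take k items j h hj]
      · rfl
    rw [List.filterMap_congr hstep, pvFilterMap_range k hk (fun i => (items.drop i).take k) items.length]
    by_cases hM : (items.length : Int) - ws + 1 ≤ 0
    · rw [PySem.List.pyRange_one_eq_nil hM]
      have h0 : items.length + 1 - k = 0 := by omega
      rw [h0]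
      simp
    · have hrange : (items.length : Int) - ws + 1 = ((items.length + 1 - k : Nat) : Int) := by
        omega
      rw [hrange, PySem.List.pyRange_zero_natCast, List.map_map]
      apply List.map_congr_left
      intro i hi
      simp only [Function.comp_apply]
      rw [← hws, PySem.List.slice_natCast_add]
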